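-- pv_equiv track=rewrite | github.com/pypi-data/pypi-mirror-368 | packages/autodoc-mcp/autodoc_mcp-0.1.7-py3-none-any.whl/autodocs_mcp/core/doc_fetcher.py | _apply_query_filter
-- ===== SOURCE A (Python) =====
-- def _apply_query_filter(content: str, query: str) -> str:
--     """Apply simple query-based filtering to content."""
--     query_terms = query.lower().split()
--
--     # Split content into sections and score by relevance
--     sections = content.split("\n\n")
--     relevant_sections = []
--
--     for section in sections:
--         section_lower = section.lower()
--         score = sum(1 for term in query_terms if term in section_lower)
--
--         if score > 0:
--             relevant_sections.append((score, section))
--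
--     # Sort by relevance and return top sections
--     relevant_sections.sort(key=lambda x: x[0], reverse=True)
--
--     return "\n\n".join([section for _, section in relevant_sections[:5]])
-- ===== SOURCE B (Python) =====
-- def _apply_query_filter(content: str, query: str) -> str:
--     """Score sections once, then pick them by descending score passes (no sort)."""
--     terms = query.lower().split()
--     scored = [(sec, sum(t in sec.lower() for t in terms))
--               for sec in content.split("\n\n")]
--     picked = [sec for s in range(len(terms), 0, -1)
--               for sec, sc in scored if sc == s]
--     return "\n\n".join(picked[:5])
-- ===== Notes on version B (the rewrite author's own statement) =====
-- stated objective: alternative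
-- what changed: B replaces A's accumulate-pairs + stable comparison sort (reverse=True) by score-selection passes: it scores every section once, then for each possible score from len(terms) down to 1 scans the scored list and collects matching sections in scan order, which reproduces the stable sort's tie order without sorting.
import Mathlib
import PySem

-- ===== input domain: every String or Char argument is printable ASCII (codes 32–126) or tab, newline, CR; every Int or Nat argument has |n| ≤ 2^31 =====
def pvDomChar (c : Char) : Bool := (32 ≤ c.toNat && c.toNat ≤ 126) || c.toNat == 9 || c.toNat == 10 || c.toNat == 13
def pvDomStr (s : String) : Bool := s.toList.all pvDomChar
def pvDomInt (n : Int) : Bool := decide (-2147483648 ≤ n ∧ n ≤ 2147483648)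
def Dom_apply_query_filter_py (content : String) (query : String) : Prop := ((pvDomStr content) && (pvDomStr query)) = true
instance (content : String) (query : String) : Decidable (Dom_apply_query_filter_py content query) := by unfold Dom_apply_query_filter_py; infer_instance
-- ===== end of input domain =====

-- B replaces A's accumulate-then-stable-sort by score-selection passes over a once-scored
-- list, scanned for each possible score from highest to lowest (alternative decomposition).

-- ===== PORT A =====
def apply_query_filter_py (content : String) (query : String) : String :=
  let query_terms := PySem.Str.split₀ (PySem.Str.lower query)
  let sections := (PySem.Str.split? content "\n\n").getD []  -- sep is a nonempty literal, so split? is some; getD is a totality guard only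
  let relevant_sections : List (Int × String) := sections.foldl (fun acc sec =>
    let section_lower := PySem.Str.lower sec
    let score : Int := (query_terms.map (fun t => if PySem.Str.isIn t section_lower then (1:Int) else 0)).sum
    if 0 < score then acc ++ [(score, sec)] else acc) []
  let sortedR := PySem.List.sorted relevant_sections (fun x => x.1) true
  PySem.Str.join "\n\n" ((sortedR.take 5).map (fun x => x.2))

-- ===== PORT B =====
def apply_query_filter_py_alt (content : String) (query : String) : String :=
  let terms := PySem.Str.split₀ (PySem.Str.lower query)
  let scored : List (String × Int) := ((PySem.Str.split? content "\n\n").getD []).map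
    (fun sec => (sec, (terms.map (fun t => if PySem.Str.isIn t (PySem.Str.lower sec) then (1:Int) else 0)).sum))
    -- sep is a nonempty literal, so split? is some; getD is a totality guard only
  let picked := (PySem.List.pyRange (terms.length : Int) 0 (-1)).flatMap
    (fun s => (scored.filter (fun p => decide (p.2 = s))).map (fun p => p.1))
  PySem.Str.join "\n\n" (picked.take 5)

-- ===== PRECONDITION & SPEC =====
def Spec_apply_query_filter_py (content : String) (query : String) (out : String) : Prop := out = apply_query_filter_py_alt content query
instance (content : String) (query : String) (out : String) : Decidable (Spec_apply_query_filter_py content query out) := by unfold Spec_apply_query_filter_py; infer_instance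

-- ===== CLAIM (what is proved, stated in full; the proofs are below) =====
def Claim_equal_apply_query_filter_py : Prop := ∀ (content : String) (query : String), Dom_apply_query_filter_py content query → Spec_apply_query_filter_py content query (apply_query_filter_py content query)

-- ===== LEMMAS AND PROOFS =====

-- score of a section under the query terms (the 0/1 sum both programs compute)
def pvScore (terms : List String) (sec : String) : Int :=
  (terms.map (fun t => if PySem.Str.isIn t (PySem.Str.lower sec) then (1:Int) else 0)).sum

theorem pvScore_eq_countP (terms : List String) (sec : String) :
    pvScore terms sec = (terms.countP (fun t => PySem.Str.isIn t (PySem.Str.lower sec)) : Int) := by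
  simp [pvScore, PySem.List.sum_map_ite_one_zero]

theorem pvScore_le (terms : List String) (sec : String) : pvScore terms sec ≤ terms.length := by
  rw [pvScore_eq_countP]
  exact_mod_cast List.countP_le_length

-- insertBy skips a prefix it does not insert into
theorem insertBy_skip {α : Type} (before : α → α → Bool) (x : α) (A B : List α)
    (h : ∀ a ∈ A, before x a = false) :
    PySem.List.insertBy before x (A ++ B) = A ++ PySem.List.insertBy before x B := by
  induction A with
  | nil => simp
  | cons a A ih =>
    have ha : before x a = false := h a (by simp)
    simp [PySem.List.insertBy, ha, ih (fun b hb => h b (by simp [hb]))]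

-- insertBy puts x in front when it precedes everything
theorem insertBy_front {α : Type} (before : α → α → Bool) (x : α) (B : List α)
    (h : ∀ b ∈ B, before x b = true) :
    PySem.List.insertBy before x B = x :: B := by
  cases B with
  | nil => rfl
  | cons b B => simp [PySem.List.insertBy, h b (by simp)]

-- inserting into a bucket decomposition appends x at the end of its own bucket
theorem insertBy_buckets (x : Int × String) (scores : List Int) (f : Int → List (Int × String))
    (hf : ∀ s ∈ scores, ∀ y ∈ f s, y.1 = s)
    (hd : scores.Pairwise (fun a b => b < a))
    (hx : x.1 ∈ scores) :
    PySem.List.insertBy (fun a b => decide (b.1 < a.1)) x (scores.flatMap f)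
      = scores.flatMap (fun s => f s ++ if x.1 = s then [x] else []) := by
  induction scores with
  | nil => simp at hx
  | cons s rest ih =>
    have hrest : ∀ b ∈ rest, b < s := by
      intro b hb; exact (List.pairwise_cons.mp hd).1 b hb
    by_cases hxs : x.1 = s
    · have hskip : ∀ a ∈ f s, (decide (a.1 < x.1)) = false := by
        intro a ha
        have := hf s (by simp) a ha
        simp [this, hxs]
      have hfront : ∀ b ∈ rest.flatMap f, (decide (b.1 < x.1)) = true := by
        intro b hb
        obtain ⟨s', hs', hbf⟩ := List.mem_flatMap.mp hb
        have h1 : b.1 = s' := hf s' (by simp [hs']) b hbf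
        have h2 : s' < s := hrest s' hs'
        simp [h1, hxs, h2]
      have hnox : ∀ s' ∈ rest, ¬ (x.1 = s') := by
        intro s' hs' he
        have := hrest s' hs'
        omega
      have hrw : rest.flatMap (fun s' => f s' ++ if x.1 = s' then [x] else []) = rest.flatMap f := by
        apply List.flatMap_congr
        intro s' hs'
        simp [hnox s' hs']
      rw [List.flatMap_cons, insertBy_skip _ _ _ _ hskip, insertBy_front _ _ _ hfront,
          List.flatMap_cons, hrw]
      simp [hxs]
    · have hx' : x.1 ∈ rest := by
        rcases List.mem_cons.mp hx with h | h
        · exact absurd h hxs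
        · exact h
      have hlt : x.1 < s := hrest _ hx'
      have hskip : ∀ a ∈ f s, (decide (a.1 < x.1)) = false := by
        intro a ha
        have := hf s (by simp) a ha
        simp [this]; omega
      rw [List.flatMap_cons, insertBy_skip _ _ _ _ hskip,
          ih (fun s' hs' => hf s' (by simp [hs'])) (List.pairwise_cons.mp hd).2 hx',
          List.flatMap_cons]
      simp [hxs]

-- the stable reverse sort by score IS the descending-bucket concatenation
theorem sorted_rev_eq_buckets (xs : List (Int × String)) (scores : List Int)
    (hd : scores.Pairwise (fun a b => b < a))
    (hall : ∀ x ∈ xs, x.1 ∈ scores) :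
    PySem.List.sorted xs (fun x => x.1) true
      = scores.flatMap (fun s => xs.filter (fun x => decide (x.1 = s))) := by
  induction xs using List.reverseRecOn with
  | nil => simp [PySem.List.sorted]
  | append_singleton xs x ih =>
    have hall' : ∀ y ∈ xs, y.1 ∈ scores := fun y hy => hall y (by simp [hy])
    rw [PySem.List.sorted_rev_eq_foldl_insertBy, List.foldl_append, List.foldl_cons,
        List.foldl_nil, ← PySem.List.sorted_rev_eq_foldl_insertBy, ih hall']
    rw [insertBy_buckets x scores _ ?_ hd (hall x (by simp))]
    · apply List.flatMap_congr
      intro s _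
      simp only [List.filter_append, List.filter_cons, List.filter_nil]
      by_cases h : x.1 = s <;> simp [h]
    · intro s _ y hy
      exact of_decide_eq_true (List.mem_filter.mp hy).2

-- the countdown range [m, m-1, …, 1] is strictly descending
theorem pyRange_countdown_pairwise (m : Nat) :
    (PySem.List.pyRange (m : Int) 0 (-1)).Pairwise (fun a b => b < a) := by
  rw [PySem.List.pyRange_neg_one]
  rw [List.pairwise_map]
  exact List.pairwise_lt_range.imp (fun h => by omega)

theorem mem_pyRange_countdown {m : Nat} {s : Int} :
    s ∈ PySem.List.pyRange (m : Int) 0 (-1) ↔ 0 < s ∧ s ≤ m := by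
  rw [PySem.List.mem_pyRange_neg_one]

theorem take_congr_of_eq {α : Type} (n : Nat) {l1 l2 : List α} (h : l1 = l2) :
    l1.take n = l2.take n := by rw [h]

-- ===== VERDICT (by name: the statement is the Claim_ definition above) =====
set_option maxHeartbeats 1000000 in
theorem apply_query_filter_py_spec : Claim_equal_apply_query_filter_py := by
  intro content query _
  unfold Spec_apply_query_filter_py apply_query_filter_py apply_query_filter_py_alt
  simp only []
  set terms := PySem.Str.split₀ (PySem.Str.lower query) with hterms
  set sections := (PySem.Str.split? content "\n\n").getD [] with hsections
  set m := terms.length with hm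
  refine congrArg (PySem.Str.join "\n\n") ?_
  -- A's accumulation loop is filter+map
  rw [show (fun (acc : List (Int × String)) sec =>
        let section_lower := PySem.Str.lower sec
        let score : Int := (terms.map (fun t => if PySem.Str.isIn t section_lower then (1:Int) else 0)).sum
        if 0 < score then acc ++ [(score, sec)] else acc)
      = (fun acc sec => if 0 < pvScore terms sec then acc ++ [(pvScore terms sec, sec)] else acc) from rfl]
  rw [PySem.List.foldl_append_ite (p := fun sec => 0 < pvScore terms sec)
      (f := fun sec => (pvScore terms sec, sec))]
  -- B's scored list, named via pvScore
  rw [show (fun sec => (sec, (terms.map (fun t => if PySem.Str.isIn t (PySem.Str.lower sec) then (1:Int) else 0)).sum))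
      = (fun sec => (sec, pvScore terms sec)) from rfl]
  -- A's stable reverse sort as descending buckets over the countdown range
  rw [sorted_rev_eq_buckets _ (PySem.List.pyRange (m : Int) 0 (-1))
      (pyRange_countdown_pairwise m) ?hall]
  case hall =>
    intro x hx
    simp only [List.nil_append, List.mem_map, List.mem_filter] at hx
    obtain ⟨sec, hsec, rfl⟩ := hx
    have h1 : 0 < pvScore terms sec := of_decide_eq_true hsec.2
    have h2 : pvScore terms sec ≤ m := pvScore_le terms sec
    exact mem_pyRange_countdown.mpr ⟨h1, h2⟩
  rw [List.map_take]
  apply take_congr_of_eq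
  rw [List.map_flatMap]
  apply List.flatMap_congr
  intro s hs
  have hs1 : 0 < s := (mem_pyRange_countdown.mp hs).1
  simp only [List.nil_append]
  rw [List.filter_map, List.map_map, List.filter_map, List.map_map, List.filter_filter]
  rw [show ((fun (x : Int × String) => x.2) ∘ fun sec => (pvScore terms sec, sec)) = id from rfl]
  rw [show ((fun (p : String × Int) => p.1) ∘ fun sec => (sec, pvScore terms sec)) = id from rfl]
  simp only [List.map_id]
  apply List.filter_congr
  intro sec _
  simp only [Function.comp]
  by_cases h : pvScore terms sec = s
  · simp [h, hs1]
  · simp [h]
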